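-- pv_equiv track=rewrite | github.com/nazymtileuzhanova/web-dev | Lab 7/CodingBat/List-2/5.py | sum67
-- ===== SOURCE A (Python) =====
-- def sum67(nums):
--   total = 0
--   skip = False
--   for i in range(len(nums)):
--     if nums[i] == 6:
--       skip = True
--     elif nums[i] == 7 and skip:
--       skip = False
--     elif not skip:
--       total += nums[i]
--   return total
-- ===== SOURCE B (Python) =====
-- def sum67(nums):
--   total = 0
--   i = 0
--   n = len(nums)
--   while i < n:
--     if nums[i] == 6:
--       i += 1
--       while i < n and nums[i] != 7:
--         i += 1
--       i += 1  # skip the 7 (or go past end if no 7)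
--     else:
--       total += nums[i]
--       i += 1
--   return total
-- ===== Notes on version B (the rewrite author's own statement) =====
-- stated objective: alternative
-- what changed: Replaces A's boolean skip-flag state machine with an index loop that consumes each 6..7 range wholesale in an inner while loop, adding only elements outside such ranges.
import Mathlib
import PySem

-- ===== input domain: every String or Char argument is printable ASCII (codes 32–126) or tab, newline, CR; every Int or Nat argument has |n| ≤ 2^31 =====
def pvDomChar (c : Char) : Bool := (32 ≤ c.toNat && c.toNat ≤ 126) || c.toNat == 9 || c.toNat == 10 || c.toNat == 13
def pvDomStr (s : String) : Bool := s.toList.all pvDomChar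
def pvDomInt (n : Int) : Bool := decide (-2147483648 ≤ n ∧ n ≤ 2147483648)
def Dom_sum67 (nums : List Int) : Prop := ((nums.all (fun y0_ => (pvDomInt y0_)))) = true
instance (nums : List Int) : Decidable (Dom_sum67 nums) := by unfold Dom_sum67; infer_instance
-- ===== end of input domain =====

-- B replaces A's boolean skip-flag state machine with an index loop that consumes each 6..7 range in an inner loop; alternative decomposition, same cost.


-- ===== PORT A =====
-- A: fold over the list carrying (total, skip), branches in A's order
def sum67Step (st : Int × Bool) (x : Int) : Int × Bool :=
  if x == 6 then (st.1, true)
  else if x == 7 && st.2 then (st.1, false)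
  else if !st.2 then (st.1 + x, st.2)
  else st

def sum67 (nums : List Int) : Int := (nums.foldl sum67Step (0, false)).1

-- ===== PORT B =====
-- inner while loop of B: advance past elements until (and including) the next 7
def dropThrough7 : List Int → List Int
  | [] => []
  | x :: xs => if x == 7 then xs else dropThrough7 xs

theorem dropThrough7_len_le (xs : List Int) : (dropThrough7 xs).length ≤ xs.length := by
  induction xs with
  | nil => simp [dropThrough7]
  | cons x xs ih => simp only [dropThrough7]; split <;> simp <;> omega

-- outer loop of B: on a 6, consume the whole 6..7 range; otherwise add and advance
def sum67_alt (nums : List Int) : Int :=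
  match nums with
  | [] => 0
  | x :: xs => if x == 6 then sum67_alt (dropThrough7 xs) else x + sum67_alt xs
termination_by nums.length
decreasing_by
  · exact Nat.lt_succ_of_le (dropThrough7_len_le xs)
  · simp

-- ===== PRECONDITION & SPEC =====
def Spec_sum67 (nums : List Int) (out : Int) : Prop := out = sum67_alt nums
instance (nums : List Int) (out : Int) : Decidable (Spec_sum67 nums out) := by unfold Spec_sum67; infer_instance

-- ===== CLAIM (what is proved, stated in full; the proofs are below) =====
def Claim_equal_sum67 : Prop := ∀ (nums : List Int), Dom_sum67 nums → Spec_sum67 nums (sum67 nums)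

-- ===== LEMMAS AND PROOFS =====
theorem sum67_foldl_char (nums : List Int) : ∀ t : Int,
    ((List.foldl sum67Step (t, false) nums).1 = t + sum67_alt nums)
    ∧ ((List.foldl sum67Step (t, true) nums).1 = t + sum67_alt (dropThrough7 nums)) := by
  induction nums with
  | nil => intro t; simp [sum67_alt, dropThrough7]
  | cons x xs ih =>
    intro t
    constructor
    · by_cases h6 : x = 6
      · subst h6
        have hs : sum67Step (t, false) 6 = (t, true) := by simp [sum67Step]
        rw [List.foldl_cons, hs, (ih t).2]
        simp [sum67_alt]
      · have hs : sum67Step (t, false) x = (t + x, false) := by simp [sum67Step, h6]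
        rw [List.foldl_cons, hs, (ih (t + x)).1]
        have h7 : sum67_alt (x :: xs) = x + sum67_alt xs := by simp [sum67_alt, h6]
        rw [h7]; ring
    · by_cases h6 : x = 6
      · subst h6
        have hs : sum67Step (t, true) 6 = (t, true) := by simp [sum67Step]
        rw [List.foldl_cons, hs, (ih t).2]
        simp [dropThrough7]
      · by_cases h7 : x = 7
        · subst h7
          have hs : sum67Step (t, true) 7 = (t, false) := by simp [sum67Step]
          rw [List.foldl_cons, hs, (ih t).1]
          simp [dropThrough7]
        · have hs : sum67Step (t, true) x = (t, true) := by simp [sum67Step, h6, h7]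
          rw [List.foldl_cons, hs, (ih t).2]
          simp [dropThrough7, h7]

-- ===== VERDICT (by name: the statement is the Claim_ definition above) =====
theorem sum67_spec : Claim_equal_sum67 := by
  intro nums _
  unfold Spec_sum67 sum67
  simpa using (sum67_foldl_char nums 0).1
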